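-- pv_equiv track=rewrite | github.com/seongjin77/coding-test | 4기-코딩테스트-220608/4기 코딩테스트_220608/4기 - 1st 코딩테스트/TruncateLetterArray/TruncateLetterArray.py | solution
-- ===== SOURCE A (Python) =====
-- from itertools import chain
--
-- def solution(arr):
--     """
--     :param arr: str[]
--     :return: str[]
--     """
--
--     words = list(chain.from_iterable(list(map(lambda s: s.split(' '), arr))))
--
--     mySet = set()
--     for word in words:
--         mySet.add(word)
--
--     result = list(mySet)
--     result.sort()
--
--     return result
-- ===== SOURCE B (Python) =====
-- def solution(arr):
--     tokens = []
--     for s in arr: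
--         tokens.extend(s.split(' '))
--     tokens.sort()
--     result = []
--     for t in tokens:
--         if not result or result[-1] != t:
--             result.append(t)
--     return result
-- ===== Notes on version B (the rewrite author's own statement) =====
-- stated objective: alternative
-- what changed: Replaces A's hash-set deduplication followed by sorting the distinct tokens with sorting the full token list (duplicates kept) and collapsing duplicates by a single adjacent-comparison scan.
import Mathlib
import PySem

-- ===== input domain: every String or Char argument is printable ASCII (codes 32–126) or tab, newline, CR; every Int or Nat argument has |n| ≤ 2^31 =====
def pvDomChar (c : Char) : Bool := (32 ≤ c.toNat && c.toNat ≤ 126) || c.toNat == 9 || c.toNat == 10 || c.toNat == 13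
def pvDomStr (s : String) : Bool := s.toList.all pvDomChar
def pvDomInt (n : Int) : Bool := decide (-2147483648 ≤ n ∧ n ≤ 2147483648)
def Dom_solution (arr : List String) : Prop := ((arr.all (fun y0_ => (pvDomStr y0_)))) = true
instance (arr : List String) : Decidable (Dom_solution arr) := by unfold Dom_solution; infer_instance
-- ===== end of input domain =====

-- B replaces A's hash-set deduplication by sorting the full token list (duplicates kept)
-- and collapsing adjacent equal tokens in one scan (objective: alternative).

-- ===== PORT A =====
-- helper shared as a primitive by both ports: s.split(' ') (sep nonempty, never raises)
def pySplitSpace (s : String) : List String := (PySem.Str.split? s " ").getD []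

def solution (arr : List String) : List String :=
  let words := (arr.map (fun s => pySplitSpace s)).flatten
  let mySet := words.foldl PySem.Set.add PySem.Set.empty
  PySem.List.sorted mySet (fun x => x) false

-- ===== PORT B =====
def solution_alt (arr : List String) : List String :=
  let tokens := arr.foldl (fun acc s => acc ++ pySplitSpace s) []
  let ts := PySem.List.sorted tokens (fun x => x) false
  ts.foldl (fun res t => if res.getLast? = some t then res else res ++ [t]) []

-- ===== PRECONDITION & SPEC =====
def Spec_solution (arr : List String) (out : List String) : Prop := out = solution_alt arr
instance (arr : List String) (out : List String) : Decidable (Spec_solution arr out) := by unfold Spec_solution; infer_instance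

-- ===== CLAIM (what is proved, stated in full; the proofs are below) =====
def Claim_equal_solution : Prop := ∀ (arr : List String), Dom_solution arr → Spec_solution arr (solution arr)

-- ===== LEMMAS AND PROOFS =====

-- an element of a strictly increasing list is ≤ its last element
theorem le_getLast?_of_pairwise_lt : ∀ (l : List String), l.Pairwise (· < ·) →
    ∀ a ∈ l, ∃ m, l.getLast? = some m ∧ a ≤ m := by
  intro l
  induction l with
  | nil => intro _ a ha; cases ha
  | cons x t ih =>
    intro h a ha
    cases t with
    | nil =>
      have : a = x := by simpa using ha
      exact ⟨x, by simp, by simp [this]⟩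
    | cons y t' =>
      have htail := (List.pairwise_cons.1 h).2
      rcases (by simpa using ha : a = x ∨ a ∈ y :: t') with rfl | h'
      · obtain ⟨m, hm, _⟩ := ih htail y (by simp)
        exact ⟨m, by rw [List.getLast?_cons_cons]; exact hm,
               le_of_lt ((List.pairwise_cons.1 h).1 m (List.mem_of_getLast? hm))⟩
      · obtain ⟨m, hm, ham⟩ := ih htail a h'
        exact ⟨m, by rw [List.getLast?_cons_cons]; exact hm, ham⟩

-- the adjacent-dedup fold: strict sortedness and membership, under the loop invariant
theorem dedup_fold_spec (ys : List String) :
    ∀ (acc : List String), acc.Pairwise (· < ·) → ys.Pairwise (· ≤ ·) →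
      (∀ a ∈ acc, ∀ y ∈ ys, a ≤ y) →
      (ys.foldl (fun res t => if res.getLast? = some t then res else res ++ [t]) acc).Pairwise (· < ·) ∧
      (∀ x, x ∈ ys.foldl (fun res t => if res.getLast? = some t then res else res ++ [t]) acc ↔ x ∈ acc ∨ x ∈ ys) := by
  induction ys with
  | nil => intro acc h _ _; exact ⟨h, by simp⟩
  | cons b ys ih =>
    intro acc hacc hys hle
    have hys' : ys.Pairwise (· ≤ ·) := (List.pairwise_cons.1 hys).2
    have hby : ∀ y ∈ ys, b ≤ y := (List.pairwise_cons.1 hys).1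
    by_cases hl : acc.getLast? = some b
    · have hbacc : b ∈ acc := List.mem_of_getLast? hl
      have hrec := ih acc hacc hys' (fun a ha y hy => hle a ha y (by simp [hy]))
      refine ⟨by simpa [List.foldl_cons, hl] using hrec.1, ?_⟩
      intro x
      rw [List.foldl_cons, if_pos hl, hrec.2 x]
      constructor
      · rintro (h | h)
        · exact Or.inl h
        · exact Or.inr (by simp [h])
      · rintro (h | h)
        · exact Or.inl h
        · rcases (by simpa using h) with rfl | h
          · exact Or.inl hbacc
          · exact Or.inr h
    · have hacc' : (acc ++ [b]).Pairwise (· < ·) := by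
        rw [List.pairwise_append]
        refine ⟨hacc, by simp, ?_⟩
        intro a ha c hc
        have hc' : c = b := by simpa using hc
        rw [hc']
        have hab : a ≤ b := hle a ha b (by simp)
        rcases lt_or_eq_of_le hab with hlt | heq
        · exact hlt
        · exfalso
          obtain ⟨m, hm, ham⟩ := le_getLast?_of_pairwise_lt acc hacc a ha
          have hma : m ≤ a := hle m (List.mem_of_getLast? hm) a (by simp [heq])
          have hmeq : m = a := le_antisymm hma ham
          exact hl (by rw [hm, hmeq, heq])
      have hle' : ∀ a ∈ acc ++ [b], ∀ y ∈ ys, a ≤ y := by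
        intro a ha y hy
        rcases List.mem_append.1 ha with h | h
        · exact hle a h y (by simp [hy])
        · simp at h; subst h; exact hby y hy
      have hrec := ih (acc ++ [b]) hacc' hys' hle'
      refine ⟨by simpa [List.foldl_cons, hl] using hrec.1, ?_⟩
      intro x
      rw [List.foldl_cons, if_neg hl, hrec.2 x]
      constructor
      · rintro (h | h)
        · rcases List.mem_append.1 h with h | h
          · exact Or.inl h
          · simp at h; exact Or.inr (by simp [h])
        · exact Or.inr (by simp [h])
      · rintro (h | h)
        · exact Or.inl (List.mem_append.2 (Or.inl h))
        · rcases (by simpa using h) with rfl | h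
          · exact Or.inl (by simp)
          · exact Or.inr h

-- ===== VERDICT (by name: the statement is the Claim_ definition above) =====
theorem solution_spec : Claim_equal_solution := by
  intro arr _
  unfold Spec_solution
  simp only [solution, solution_alt]
  set words := (arr.map (fun s => pySplitSpace s)).flatten with hwords
  have htok : arr.foldl (fun acc s => acc ++ pySplitSpace s) [] = words := by
    rw [PySem.List.foldl_append_eq_flatMap]
    simp [hwords, List.flatMap_def]
  rw [htok]
  have hset : words.foldl PySem.Set.add PySem.Set.empty = PySem.Set.ofList words := by
    rw [PySem.Set.ofList_eq_foldl]; rfl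
  rw [hset]
  set ts := PySem.List.sorted words (fun x => x) false with hts
  have hsorted : ts.Pairwise (· ≤ ·) := by
    simpa using PySem.List.sorted_pairwise words (fun x => x)
  obtain ⟨hpw, hmem⟩ := dedup_fold_spec ts [] (by simp) hsorted (by simp)
  set dd := ts.foldl (fun res t => if res.getLast? = some t then res else res ++ [t]) [] with hdd
  have hperm : dd.Perm (PySem.Set.ofList words) := by
    rw [List.perm_ext_iff_of_nodup hpw.nodup (PySem.Set.nodup_ofList words)]
    intro x
    rw [hmem x, PySem.Set.mem_ofList]
    simp [hts, PySem.List.mem_sorted]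
  exact PySem.List.sorted_eq_of_perm_of_pairwise_lt _ _ _ hperm (by simpa using hpw)
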